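-- pv_equiv track=rewrite | github.com/Catalina-out/CTCI_python | chapter_17/p17_8.py | get_circus_tower
-- ===== SOURCE A (Python) =====
-- from typing import List, Tuple
--
-- def can_add(bot: tuple, top: tuple) -> bool:
--     return bot[0] > top[0] and bot[1] > top[1]
--
-- def get_circus_tower(arr: List[tuple]) -> List[tuple]:
--     seqs = []  # Start poz -> list of heights
--     sorted_arr = sorted(arr, reverse=True)
--
--     for i in range(len(arr)):
--         for good_seq in filter(lambda sq: can_add(sq[-1], sorted_arr[i]), seqs):
--             good_seq.append(sorted_arr[i])
--
--         # for j in range(len(seqs)):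
--         #     if can_add(seqs[j][-1], sorted_arr[i]):
--         #         seqs[j].append(sorted_arr[i])
--         seqs.append([sorted_arr[i]])
--     return max(seqs, key=len)
-- ===== SOURCE B (Python) =====
-- from typing import List, Tuple
--
-- def can_add(bot: tuple, top: tuple) -> bool:
--     return bot[0] > top[0] and bot[1] > top[1]
--
-- def get_circus_tower(arr: List[tuple]) -> List[tuple]:
--     # Sort descending once, then build each start-position's greedy chain
--     # independently by walking its suffix, instead of updating all partial
--     # chains while scanning the elements once.
--     sorted_arr = sorted(arr, reverse=True)
--     seqs = []
--     rest = sorted_arr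
--     while rest:
--         start, rest = rest[0], rest[1:]
--         seq = [start]
--         for item in rest:
--             if can_add(seq[-1], item):
--                 seq.append(item)
--         seqs.append(seq)
--     return max(seqs, key=len)
-- ===== Notes on version B (the rewrite author's own statement) =====
-- stated objective: alternative
-- what changed: B interchanges the loops: instead of one pass over the sorted elements that extends every existing partial chain, B walks the suffix after each start position and greedily builds that start's chain on its own, collecting whole chains one at a time.
import Mathlib
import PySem

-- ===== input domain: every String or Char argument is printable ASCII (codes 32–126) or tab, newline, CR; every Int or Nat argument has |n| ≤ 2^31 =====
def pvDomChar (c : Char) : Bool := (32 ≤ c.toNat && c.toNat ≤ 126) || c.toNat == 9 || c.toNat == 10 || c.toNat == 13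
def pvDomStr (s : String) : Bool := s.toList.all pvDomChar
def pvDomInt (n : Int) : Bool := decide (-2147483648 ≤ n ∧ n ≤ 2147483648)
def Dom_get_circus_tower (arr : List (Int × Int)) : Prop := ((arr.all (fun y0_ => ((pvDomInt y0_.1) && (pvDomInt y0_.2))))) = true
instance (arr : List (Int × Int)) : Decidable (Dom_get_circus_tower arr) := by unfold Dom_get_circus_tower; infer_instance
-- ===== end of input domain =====

-- B builds each start's greedy chain independently over its suffix (one chain at a
-- time) instead of A's single pass extending all partial chains; same result, same
-- tie-breaking, and both raise on empty input (excluded by Pre_).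

-- ===== PORT A =====
-- can_add(bot, top)
def can_add (bot top : Int × Int) : Bool := decide (bot.1 > top.1) && decide (bot.2 > top.2)

-- can_add(sq[-1], item); sq is always nonempty wherever this is applied, so the
-- (0,0) default of the exact pyGet? (-1) is never used.
def pvExt (seq : List (Int × Int)) (item : Int × Int) : List (Int × Int) :=
  if can_add ((PySem.List.pyGet? seq (-1)).getD (0, 0)) item then seq ++ [item] else seq

def get_circus_tower (arr : List (Int × Int)) : List (Int × Int) :=
  let sorted_arr := PySem.List.sorted2 arr Prod.fst Prod.snd true
  -- for i in range(len(arr)): extend every chain that admits sorted_arr[i], append [sorted_arr[i]]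
  let seqs := (PySem.List.pyRange 0 (arr.length : Int) 1).foldl
    (fun seqs i =>
      (seqs.map (fun sq => pvExt sq (PySem.List.pyGetD sorted_arr i (0, 0)))) ++
        [[PySem.List.pyGetD sorted_arr i (0, 0)]]) []
  (PySem.List.max? seqs (fun sq => (sq.length : Int))).getD []

-- ===== PORT B =====
-- the 'while rest:' loop of Source B: pop the head, grow its greedy chain over the rest
def pvChainLoop : List (List (Int × Int)) → List (Int × Int) → List (List (Int × Int))
  | seqs, [] => seqs
  | seqs, start :: rest => pvChainLoop (seqs ++ [rest.foldl pvExt [start]]) rest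

def get_circus_tower_alt (arr : List (Int × Int)) : List (Int × Int) :=
  let sorted_arr := PySem.List.sorted2 arr Prod.fst Prod.snd true
  let seqs := pvChainLoop [] sorted_arr
  (PySem.List.max? seqs (fun sq => (sq.length : Int))).getD []

-- ===== PRECONDITION & SPEC =====
-- Pre_ excludes only the empty list, on which both Pythons raise ValueError (max of an empty sequence).
def Pre_get_circus_tower (arr : List (Int × Int)) : Prop := arr ≠ []
instance (arr : List (Int × Int)) : Decidable (Pre_get_circus_tower arr) := by unfold Pre_get_circus_tower; infer_instance
def pvWitness_get_circus_tower : (List (Int × Int)) := [(1, 1)]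

def Spec_get_circus_tower (arr : List (Int × Int)) (out : List (Int × Int)) : Prop := out = get_circus_tower_alt arr
instance (arr : List (Int × Int)) (out : List (Int × Int)) : Decidable (Spec_get_circus_tower arr out) := by unfold Spec_get_circus_tower; infer_instance

-- ===== CLAIM =====
def Claim_equal_get_circus_tower : Prop := ∀ (arr : List (Int × Int)), Dom_get_circus_tower arr → Pre_get_circus_tower arr → Spec_get_circus_tower arr (get_circus_tower arr)

-- ===== LEMMAS AND PROOFS =====

lemma pvChainLoop_acc (xs : List (Int × Int)) :
    ∀ acc, pvChainLoop acc xs = acc ++ pvChainLoop [] xs := by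
  induction xs with
  | nil => intro acc; simp [pvChainLoop]
  | cons x t ih =>
      intro acc
      simp only [pvChainLoop]
      rw [ih (acc ++ _), ih ([] ++ _)]
      simp

-- A's element-pass over xs, started from any chain list `init`, yields the chains of
-- `init` grown by all of xs followed by the per-start greedy chains of xs (= B's loop).
lemma pvFold_eq_chains (xs : List (Int × Int)) :
    ∀ init : List (List (Int × Int)),
      xs.foldl (fun seqs x => (seqs.map (fun sq => pvExt sq x)) ++ [[x]]) init
        = init.map (fun sq => xs.foldl pvExt sq) ++ pvChainLoop [] xs := by
  induction xs with
  | nil => intro init; simp [pvChainLoop]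
  | cons x t ih =>
      intro init
      simp only [List.foldl_cons]
      rw [ih]
      rw [show pvChainLoop [] (x :: t) = pvChainLoop ([] ++ [t.foldl pvExt [x]]) t from rfl,
          pvChainLoop_acc t ([] ++ [t.foldl pvExt [x]])]
      simp [Function.comp]

theorem get_circus_tower_spec : Claim_equal_get_circus_tower := by
  intro arr _ _
  unfold Spec_get_circus_tower get_circus_tower get_circus_tower_alt
  have hlen : (arr.length : Int) = ((PySem.List.sorted2 arr Prod.fst Prod.snd true).length : Int) := by
    rw [List.Perm.length_eq (PySem.List.sorted2_perm arr Prod.fst Prod.snd true)]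
  simp only [hlen]
  rw [PySem.List.foldl_pyRange_zero_pyGetD' (PySem.List.sorted2 arr Prod.fst Prod.snd true) (0, 0)
      (fun seqs x => (seqs.map (fun sq => pvExt sq x)) ++ [[x]]) []]
  rw [pvFold_eq_chains]
  simp
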